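-- pv_equiv track=rewrite | github.com/altermarkive/training | algorithms/code/leetcode/lc077_combinations/lc077_combinations.py | integer_list_comparator
-- ===== SOURCE A (Python) =====
-- def integer_list_comparator(
--     l1: list[list[int]], l2: list[list[int]]
-- ) -> int:  # pragma: no cover
--     if len(l1) < len(l2):
--         return -1
--     if len(l1) > len(l2):
--         return 1
--     for l1i, l2i in zip(l1, l2, strict=True):
--         if l1i < l2i:
--             return -1
--         if l1i > l2i:
--             return 1
--     return 0
-- ===== SOURCE B (Python) =====
-- def _cmp_ints(a: list[int], b: list[int]) -> int:
--     # recursive three-way lexicographic comparison of int lists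
--     if a and b:
--         d = (a[0] > b[0]) - (a[0] < b[0])
--         return d if d else _cmp_ints(a[1:], b[1:])
--     return (len(a) > 0) - (len(b) > 0)
--
--
-- def _cmp_rows(l1: list[list[int]], l2: list[list[int]]) -> int:
--     # recursive three-way comparison of equal-length row lists
--     if l1 and l2:
--         d = _cmp_ints(l1[0], l2[0])
--         return d if d else _cmp_rows(l1[1:], l2[1:])
--     return 0
--
--
-- def integer_list_comparator(
--     l1: list[list[int]], l2: list[list[int]]
-- ) -> int:
--     n1, n2 = len(l1), len(l2)
--     d = (n1 > n2) - (n1 < n2)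
--     return d if d else _cmp_rows(l1, l2)
-- ===== Notes on version B (the rewrite author's own statement) =====
-- stated objective: alternative
-- what changed: Replaces A's boolean early-return loop over Python's built-in list < / > comparisons by a pair of recursive three-way comparators that compute each sign arithmetically ((x > y) - (x < y)) and chain on zero, never using list comparison or early returns.
import Mathlib
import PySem

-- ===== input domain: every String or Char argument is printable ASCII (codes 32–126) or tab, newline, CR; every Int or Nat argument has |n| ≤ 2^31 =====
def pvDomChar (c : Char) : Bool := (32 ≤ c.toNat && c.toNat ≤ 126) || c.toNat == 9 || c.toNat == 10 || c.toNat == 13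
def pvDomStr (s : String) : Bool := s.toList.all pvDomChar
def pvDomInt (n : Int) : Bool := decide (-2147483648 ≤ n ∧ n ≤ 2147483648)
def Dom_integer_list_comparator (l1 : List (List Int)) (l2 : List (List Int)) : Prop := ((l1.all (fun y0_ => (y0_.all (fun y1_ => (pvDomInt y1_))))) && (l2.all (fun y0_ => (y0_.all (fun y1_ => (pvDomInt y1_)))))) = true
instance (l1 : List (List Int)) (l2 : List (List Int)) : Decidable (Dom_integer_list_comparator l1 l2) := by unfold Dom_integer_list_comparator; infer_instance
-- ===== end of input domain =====

-- B replaces A's length guards, built-in list comparisons and early-return loop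
-- by recursive three-way comparators computing signs arithmetically; objective: alternative.

-- ===== PORT A =====
-- Python's builtin `<` on list[int] (lexicographic), used by A's `l1i < l2i` / `l1i > l2i`
def pyLtII : List Int → List Int → Bool
  | [], [] => false
  | [], _ :: _ => true
  | _ :: _, [] => false
  | x :: xs, y :: ys => if x = y then pyLtII xs ys else decide (x < y)

-- the `for l1i, l2i in zip(l1, l2)` loop with its two early returns
def pvLoopA : List (List Int) → List (List Int) → Int
  | x :: xs, y :: ys =>
      if pyLtII x y then -1
      else if pyLtII y x then 1
      else pvLoopA xs ys
  | _, _ => 0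

def integer_list_comparator (l1 : List (List Int)) (l2 : List (List Int)) : Int :=
  if l1.length < l2.length then -1
  else if l1.length > l2.length then 1
  else pvLoopA l1 l2

-- ===== PORT B =====
-- _cmp_ints: recursive three-way comparison of int lists (a[1:] on a cons = tail)
def cmpInts : List Int → List Int → Int
  | x :: xs, y :: ys =>
      let d : Int := (if x > y then 1 else 0) - (if x < y then 1 else 0)
      if d ≠ 0 then d else cmpInts xs ys
  | a, b => (if a.length > 0 then 1 else 0) - (if b.length > 0 then 1 else 0)

-- _cmp_rows: recursive three-way comparison of the row lists
def cmpRows : List (List Int) → List (List Int) → Int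
  | x :: xs, y :: ys =>
      let d := cmpInts x y
      if d ≠ 0 then d else cmpRows xs ys
  | _, _ => 0

def integer_list_comparator_alt (l1 : List (List Int)) (l2 : List (List Int)) : Int :=
  let n1 := l1.length
  let n2 := l2.length
  let d : Int := (if n1 > n2 then 1 else 0) - (if n1 < n2 then 1 else 0)
  if d ≠ 0 then d else cmpRows l1 l2

-- ===== PRECONDITION & SPEC =====
def Spec_integer_list_comparator (l1 : List (List Int)) (l2 : List (List Int)) (out : Int) : Prop := out = integer_list_comparator_alt l1 l2
instance (l1 : List (List Int)) (l2 : List (List Int)) (out : Int) : Decidable (Spec_integer_list_comparator l1 l2 out) := by unfold Spec_integer_list_comparator; infer_instance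

-- ===== CLAIM (what is proved, stated in full; the proofs are below) =====
def Claim_equal_integer_list_comparator : Prop := ∀ (l1 : List (List Int)) (l2 : List (List Int)), Dom_integer_list_comparator l1 l2 → Spec_integer_list_comparator l1 l2 (integer_list_comparator l1 l2)

-- ===== LEMMAS AND PROOFS =====

-- B's int-list comparator is the signed pair of Python's lexicographic tests
theorem cmpInts_eq : ∀ (x y : List Int),
    cmpInts x y = (if pyLtII x y then (-1 : Int) else if pyLtII y x then 1 else 0) := by
  intro x
  induction x with
  | nil => intro y; cases y <;> simp [cmpInts, pyLtII]
  | cons a xs ih =>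
    intro y
    cases y with
    | nil => simp [cmpInts, pyLtII]
    | cons b ys =>
      simp only [cmpInts, pyLtII]
      by_cases hab : a = b
      · subst hab; simp [ih ys]
      · have hba : ¬ b = a := fun hh => hab hh.symm
        rcases lt_trichotomy a b with h | h | h
        · have h1 : ¬ a > b := by omega
          simp [hab, h, h1]
        · exact absurd h hab
        · have h1 : ¬ a < b := by omega
          have h2 : ¬ b > a := by omega
          simp [hab, hba, h, h1]

-- A's zip loop equals B's recursive row comparator (no length hypothesis needed:
-- both return 0 as soon as either side is exhausted, and the outer length guards
-- make the mismatched-length case unreachable anyway)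
theorem loopA_eq : ∀ (a b : List (List Int)), pvLoopA a b = cmpRows a b := by
  intro a
  induction a with
  | nil => intro b; cases b <;> simp [pvLoopA, cmpRows]
  | cons x xs ih =>
    intro b
    cases b with
    | nil => simp [pvLoopA, cmpRows]
    | cons y ys =>
      simp only [pvLoopA, cmpRows, cmpInts_eq]
      by_cases h1 : pyLtII x y <;> by_cases h2 : pyLtII y x <;>
        simp [h1, h2, ih]

-- ===== VERDICT (by name: the statement is the Claim_ definition above) =====
theorem integer_list_comparator_spec : Claim_equal_integer_list_comparator := by
  intro l1 l2 _
  unfold Spec_integer_list_comparator integer_list_comparator integer_list_comparator_alt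
  by_cases hlt : l1.length < l2.length
  · have : ¬ l1.length > l2.length := by omega
    simp [hlt, this]
  · by_cases hgt : l1.length > l2.length
    · simp [hlt, hgt]
    · have h1 : ¬ l1.length > l2.length := hgt
      simp [hlt, h1, loopA_eq]
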